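-- pv_equiv track=rewrite | github.com/xeland314/xeland314.github.io | public/videos/dragon_curve_ppm.py | get_dragon_points
-- ===== SOURCE A (Python) =====
-- def get_dragon_points(iterations):
--     points = [(0, 0), (1, 0)]
--     for _ in range(iterations):
--         last_x, last_y = points[-1]
--         new_points = []
--         for i in range(len(points) - 2, -1, -1):
--             px, py = points[i]
--             # Rotar 90 grados alrededor del último punto
--             nx = last_x - (py - last_y)
--             ny = last_y + (px - last_x)
--             new_points.append((nx, ny))
--         points.extend(new_points)
--     return points
-- ===== SOURCE B (Python) =====
-- def get_dragon_points(iterations):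
--     # Work with segment direction vectors instead of rotating points:
--     # each iteration appends the reversed, clockwise-rotated directions,
--     # then a single prefix-sum walk produces the points.
--     dirs = [(1, 0)]
--     for _ in range(iterations):
--         dirs += [(dy, -dx) for dx, dy in reversed(dirs)]
--     points = [(0, 0)]
--     x = y = 0
--     for dx, dy in dirs:
--         x += dx
--         y += dy
--         points.append((x, y))
--     return points
-- ===== Notes on version B (the rewrite author's own statement) =====
-- stated objective: alternative
-- what changed: B doubles a list of segment direction vectors (append reversed, clockwise-rotated directions) and produces the points with one prefix-sum walk, instead of A's per-iteration rotation of every existing point about the moving last point.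
import Mathlib
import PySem

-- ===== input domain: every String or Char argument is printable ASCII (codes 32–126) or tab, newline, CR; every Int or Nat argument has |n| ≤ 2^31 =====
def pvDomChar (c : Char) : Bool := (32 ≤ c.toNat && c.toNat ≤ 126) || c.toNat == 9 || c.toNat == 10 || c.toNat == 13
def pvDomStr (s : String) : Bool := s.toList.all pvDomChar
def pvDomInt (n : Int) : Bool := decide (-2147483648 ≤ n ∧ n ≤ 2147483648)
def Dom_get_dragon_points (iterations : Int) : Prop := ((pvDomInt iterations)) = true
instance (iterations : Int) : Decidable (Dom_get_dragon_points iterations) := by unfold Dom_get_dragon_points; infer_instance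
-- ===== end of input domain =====

-- B replaces A's point-rotation doubling by direction-vector doubling plus a single
-- prefix-sum walk (objective: alternative/idiomatic; same asymptotic cost).

-- ===== PORT A =====
-- one body of A's outer loop: rotate all but the last point 90° about the last point,
-- walking the indices len-2 .. 0, and extend the list
def pvStepA (points : List (Int × Int)) : List (Int × Int) :=
  let last := (PySem.List.pyGet? points (-1)).getD (0, 0)
  let new_points := (PySem.List.pyRange ((points.length : Int) - 2) (-1) (-1)).foldl
    (fun acc i =>
      let p := (PySem.List.pyGet? points i).getD (0, 0)
      acc ++ [(last.1 - (p.2 - last.2), last.2 + (p.1 - last.1))]) []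
  points ++ new_points

def get_dragon_points (iterations : Int) : List (Int × Int) :=
  (List.range iterations.toNat).foldl (fun points _ => pvStepA points) [(0, 0), (1, 0)]

-- ===== PORT B =====
-- one body of B's doubling loop on direction vectors
def pvStepB (dirs : List (Int × Int)) : List (Int × Int) :=
  dirs ++ dirs.reverse.map (fun d => (d.2, -d.1))

def get_dragon_points_alt (iterations : Int) : List (Int × Int) :=
  let dirs := (List.range iterations.toNat).foldl (fun ds _ => pvStepB ds) [(1, 0)]
  (dirs.foldl
    (fun (st : List (Int × Int) × Int × Int) d =>
      (st.1 ++ [(st.2.1 + d.1, st.2.2 + d.2)], st.2.1 + d.1, st.2.2 + d.2))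
    ([(0, 0)], 0, 0)).1

-- ===== PRECONDITION & SPEC =====
def Spec_get_dragon_points (iterations : Int) (out : List (Int × Int)) : Prop := out = get_dragon_points_alt iterations
instance (iterations : Int) (out : List (Int × Int)) : Decidable (Spec_get_dragon_points iterations out) := by unfold Spec_get_dragon_points; infer_instance

-- ===== CLAIM (what is proved, stated in full; the proofs are below) =====
def Claim_equal_get_dragon_points : Prop := ∀ (iterations : Int), Dom_get_dragon_points iterations → Spec_get_dragon_points iterations (get_dragon_points iterations)

-- ===== LEMMAS AND PROOFS =====

-- points visited when walking direction list `ds` starting at (x, y), excluding the start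
def pvWalk (x y : Int) : List (Int × Int) → List (Int × Int)
  | [] => []
  | d :: t => (x + d.1, y + d.2) :: pvWalk (x + d.1) (y + d.2) t

def pvSX (ds : List (Int × Int)) : Int := (ds.map Prod.fst).sum
def pvSY (ds : List (Int × Int)) : Int := (ds.map Prod.snd).sum

theorem pvWalk_append (a b : List (Int × Int)) : ∀ x y,
    pvWalk x y (a ++ b) = pvWalk x y a ++ pvWalk (x + pvSX a) (y + pvSY a) b := by
  induction a with
  | nil => intro x y; simp [pvWalk, pvSX, pvSY]
  | cons d t ih =>
      intro x y
      simp only [List.cons_append, pvWalk, ih, pvSX, pvSY, List.map_cons, List.sum_cons,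
        add_assoc]

theorem pvWalk_length (ds : List (Int × Int)) : ∀ x y, (pvWalk x y ds).length = ds.length := by
  induction ds with
  | nil => intro x y; simp [pvWalk]
  | cons d t ih => intro x y; simp [pvWalk, ih]

theorem pvFoldB (ds : List (Int × Int)) : ∀ (acc : List (Int × Int)) x y,
    (ds.foldl
      (fun (st : List (Int × Int) × Int × Int) d =>
        (st.1 ++ [(st.2.1 + d.1, st.2.2 + d.2)], st.2.1 + d.1, st.2.2 + d.2))
      (acc, x, y)).1 = acc ++ pvWalk x y ds := by
  induction ds with
  | nil => intro acc x y; simp [pvWalk]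
  | cons d t ih => intro acc x y; simp [List.foldl_cons, ih, pvWalk]

theorem pvGetLast (ds : List (Int × Int)) : ∀ x y,
    ((x, y) :: pvWalk x y ds).getLast? = some (x + pvSX ds, y + pvSY ds) := by
  induction ds with
  | nil => intro x y; simp [pvWalk, pvSX, pvSY]
  | cons d t ih =>
      intro x y
      have h := ih (x + d.1) (y + d.2)
      simp only [pvWalk, List.getLast?_cons_cons] at h ⊢
      rw [h]
      simp only [pvSX, pvSY, List.map_cons, List.sum_cons, add_assoc]

theorem pvGetNegOne {α : Type} (xs : List α) (h : xs ≠ []) :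
    PySem.List.pyGet? xs (-1) = xs.getLast? := by
  have hl : 0 < xs.length := List.length_pos_iff.mpr h
  simp only [PySem.List.pyGet?, PySem.List.pyIdx?]
  rw [if_neg (by omega), if_pos (by omega)]
  simp [List.getLast?_eq_getElem?, Option.bind]

theorem pvRangeDown (n : Nat) :
    PySem.List.pyRange ((n : Int) - 1) (-1) (-1)
      = (List.range n).map (fun k : Nat => (n : Int) - 1 - (k : Int)) := by
  simp only [PySem.List.pyRange]
  rw [if_neg (by omega)]
  rcases Nat.eq_zero_or_pos n with h | h
  · subst h; norm_num
  · rw [if_neg (by omega), if_pos (by omega)]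
    have hc : (((n : Int) - 1 - -1 + - -1 - 1) / - -1).toNat = n := by norm_num
    rw [hc]
    apply List.map_congr_left
    intro k _
    ring

theorem pvFoldAppendMap {α β : Type} (l : List α) (f : α → β) : ∀ acc : List β,
    l.foldl (fun a i => a ++ [f i]) acc = acc ++ l.map f := by
  induction l with
  | nil => intro acc; simp
  | cons d t ih => intro acc; simp [List.foldl_cons, ih]

theorem pvNewIndexed {α : Type} (pts : List α) (g : α → α) (n : Nat) (d : α)
    (hn : pts.length = n + 1) :
    (List.range n).map (fun k : Nat => g ((PySem.List.pyGet? pts ((n : Int) - 1 - (k : Int))).getD d))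
      = pts.dropLast.reverse.map g := by
  apply List.ext_getElem
  · simp [hn]
  · intro k h1 h2
    simp only [List.getElem_map, List.getElem_range, List.getElem_reverse]
    have hk : k < n := by simpa using h1
    have hidx : ((n : Int) - 1 - (k : Int)) = ((n - 1 - k : Nat) : Int) := by omega
    have hlt : n - 1 - k < pts.length := by omega
    have hget : PySem.List.pyGet? pts ((n : Int) - 1 - (k : Int)) = some pts[n - 1 - k] := by
      rw [hidx]
      simp only [PySem.List.pyGet?, PySem.List.pyIdx?]
      rw [if_pos (by positivity), if_pos (by exact_mod_cast hlt)]
      simp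
    rw [hget]
    simp only [Option.getD_some]
    congr 1
    rw [List.getElem_dropLast]
    congr 1
    simp only [List.length_dropLast, hn] at h2 ⊢
    omega

-- the rotation A performs about the last point L
def pvRot (L p : Int × Int) : Int × Int := (L.1 - (p.2 - L.2), L.2 + (p.1 - L.1))

theorem pvSX_rev_map (t : List (Int × Int)) :
    pvSX ((t.map (fun d => (d.2, -d.1))).reverse) = pvSY t := by
  simp only [pvSX, pvSY, List.map_reverse, List.sum_reverse, List.map_map]
  induction t with
  | nil => simp
  | cons d t ih => simp_all

theorem pvSY_rev_map (t : List (Int × Int)) :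
    pvSY ((t.map (fun d => (d.2, -d.1))).reverse) = -pvSX t := by
  simp only [pvSX, pvSY, List.map_reverse, List.sum_reverse, List.map_map]
  induction t with
  | nil => simp
  | cons d t ih => simp only [List.map_cons, List.sum_cons, ih, Function.comp_apply]; ring

-- the heart: rotating the reversed initial points about the endpoint
-- is the same as walking the reversed rotated directions from the endpoint
theorem pvCore (ds : List (Int × Int)) : ∀ x y,
    ((x, y) :: pvWalk x y ds).dropLast.reverse.map (pvRot (x + pvSX ds, y + pvSY ds))
      = pvWalk (x + pvSX ds) (y + pvSY ds) (ds.reverse.map (fun d => (d.2, -d.1))) := by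
  induction ds with
  | nil => intro x y; simp [pvWalk, pvSX, pvSY]
  | cons d t ih =>
      intro x y
      have hL1 : x + pvSX (d :: t) = (x + d.1) + pvSX t := by
        simp [pvSX]; ring
      have hL2 : y + pvSY (d :: t) = (y + d.2) + pvSY t := by
        simp [pvSY]; ring
      have hne : (x + d.1, y + d.2) :: pvWalk (x + d.1) (y + d.2) t ≠ [] := by simp
      calc ((x, y) :: pvWalk x y (d :: t)).dropLast.reverse.map (pvRot (x + pvSX (d :: t), y + pvSY (d :: t)))
          = (((x + d.1, y + d.2) :: pvWalk (x + d.1) (y + d.2) t).dropLast.reverse.map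
              (pvRot ((x + d.1) + pvSX t, (y + d.2) + pvSY t)))
            ++ [pvRot ((x + d.1) + pvSX t, (y + d.2) + pvSY t) (x, y)] := by
            rw [hL1, hL2]
            simp [pvWalk, List.dropLast_cons_of_ne_nil hne]
        _ = pvWalk ((x + d.1) + pvSX t) ((y + d.2) + pvSY t) (t.reverse.map (fun d => (d.2, -d.1)))
            ++ [pvRot ((x + d.1) + pvSX t, (y + d.2) + pvSY t) (x, y)] := by rw [ih]
        _ = pvWalk (x + pvSX (d :: t)) (y + pvSY (d :: t)) ((d :: t).reverse.map (fun d => (d.2, -d.1))) := by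
            rw [hL1, hL2]
            simp only [List.reverse_cons, List.map_append, List.map_cons, List.map_nil,
              List.map_reverse]
            rw [pvWalk_append]
            congr 1
            simp only [pvWalk, pvRot, pvSX_rev_map, pvSY_rev_map, List.cons.injEq,
              Prod.mk.injEq, and_true]
            constructor <;> ring

-- one iteration of A on a walk equals the walk of one iteration of B
theorem pvStep_eq (ds : List (Int × Int)) (x y : Int) :
    pvStepA ((x, y) :: pvWalk x y ds) = (x, y) :: pvWalk x y (pvStepB ds) := by
  have hlen : ((x, y) :: pvWalk x y ds).length = ds.length + 1 := by simp [pvWalk_length]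
  have hlast : (PySem.List.pyGet? ((x, y) :: pvWalk x y ds) (-1)).getD (0, 0)
      = (x + pvSX ds, y + pvSY ds) := by
    rw [pvGetNegOne _ (by simp), pvGetLast]; rfl
  have hcast : ((((x, y) :: pvWalk x y ds).length : Int) - 2) = ((ds.length : Int) - 1) := by
    rw [hlen]; push_cast; ring
  show ((x, y) :: pvWalk x y ds) ++ _ = _
  rw [hlast, hcast, pvRangeDown, pvFoldAppendMap, List.map_map, List.nil_append]
  show ((x, y) :: pvWalk x y ds) ++
      (List.range ds.length).map (fun k : Nat =>
        pvRot (x + pvSX ds, y + pvSY ds)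
          ((PySem.List.pyGet? ((x, y) :: pvWalk x y ds) ((ds.length : Int) - 1 - (k : Int))).getD (0, 0)))
    = (x, y) :: pvWalk x y (pvStepB ds)
  rw [pvNewIndexed ((x, y) :: pvWalk x y ds) (pvRot (x + pvSX ds, y + pvSY ds)) ds.length (0, 0) hlen]
  rw [pvCore]
  show _ = (x, y) :: pvWalk x y (ds ++ ds.reverse.map (fun d => (d.2, -d.1)))
  rw [pvWalk_append]
  simp

theorem pvMain (n : Nat) :
    (List.range n).foldl (fun points _ => pvStepA points) [(0, 0), (1, 0)]
      = (0, 0) :: pvWalk 0 0 ((List.range n).foldl (fun ds _ => pvStepB ds) [(1, 0)]) := by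
  induction n with
  | zero => simp [pvWalk]
  | succ m ih =>
      rw [List.range_succ, List.foldl_append, List.foldl_append]
      simp only [List.foldl_cons, List.foldl_nil, ih]
      exact pvStep_eq _ 0 0

-- ===== VERDICT (by name: the statement is the Claim_ definition above) =====
theorem get_dragon_points_spec : Claim_equal_get_dragon_points := by
  intro iterations _
  show get_dragon_points iterations = get_dragon_points_alt iterations
  unfold get_dragon_points get_dragon_points_alt
  rw [pvFoldB]
  simp only [List.singleton_append]
  exact pvMain iterations.toNat
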